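-- pv_equiv track=rewrite | github.com/EsmerlynG/MOOCfiPythonProblems | Part06/part06-19_incorrect_lottery_numbers/src/incorrect_lottery_numbers.py | filter_lot_num
-- ===== SOURCE A (Python) =====
-- def filter_lot_num(lot_num: str):
--     num_list = lot_num.split(",")
--
--     try:
--         num_list = list(map(int, num_list))
--
--     except ValueError:
--         return False
--
--     if len(set(num_list)) != 7:
--         return False
--
--     for num in num_list:
--         if num > 39 or num < 1:
--             return False
--
--     return True
-- ===== SOURCE B (Python) =====
-- def filter_lot_num(lot_num: str):
--     try:
--         nums = sorted(map(int, lot_num.split(",")))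
--     except ValueError:
--         return False
--     # sort-then-scan: distinct count = 1 + number of strict increases between neighbours
--     distinct = 1 + sum(1 for a, b in zip(nums, nums[1:]) if a < b)
--     return distinct == 7 and nums[0] >= 1 and nums[-1] <= 39
-- ===== Notes on version B (the rewrite author's own statement) =====
-- stated objective: alternative
-- what changed: Replaces A's hash-set distinctness test and per-element bounds loop by sort-then-scan: sort the parsed numbers, count distinct values as 1 + the number of strict increases between adjacent elements, and check the bounds only at the two extremes nums[0] and nums[-1].
import Mathlib
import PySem

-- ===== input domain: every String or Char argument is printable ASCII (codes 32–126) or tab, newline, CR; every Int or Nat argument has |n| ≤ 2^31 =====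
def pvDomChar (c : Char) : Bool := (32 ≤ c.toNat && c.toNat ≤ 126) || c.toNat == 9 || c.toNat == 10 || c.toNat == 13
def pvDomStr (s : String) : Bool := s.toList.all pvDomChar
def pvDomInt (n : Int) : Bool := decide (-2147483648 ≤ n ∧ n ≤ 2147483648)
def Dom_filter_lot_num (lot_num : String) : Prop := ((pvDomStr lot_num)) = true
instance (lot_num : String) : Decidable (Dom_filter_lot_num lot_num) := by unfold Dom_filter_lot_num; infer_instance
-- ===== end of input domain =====

-- B replaces A's set-based distinctness test and per-element bounds loop by sort-then-scan:
-- count distinct values by adjacent strict increases in the sorted list, check bounds at the extremes.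

-- ===== PORT A =====
-- the 'for num in num_list' bounds loop with early return
def pvAllInRange : List Int → Bool
  | [] => true
  | n :: ns => if n > 39 || n < 1 then false else pvAllInRange ns

def filter_lot_num (lot_num : String) : Bool :=
  let num_list := (PySem.Str.split? lot_num ",").getD []
  match num_list.mapM PySem.Int.ofStr? with
  | none => false
  | some ns =>
      if PySem.Set.len (PySem.Set.ofList ns) ≠ 7 then false
      else pvAllInRange ns

-- ===== PORT B =====
-- Source B: parse, sort, count adjacent strict increases (sum of the generator = countP of the zip),
-- then one boolean.  nums[0] / nums[-1] via pyGet?; the .getD 0 default is unreachable on the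
-- inputs Python reaches (split always yields at least one token, so nums ≠ [] there).
def filter_lot_num_alt (lot_num : String) : Bool :=
  match ((PySem.Str.split? lot_num ",").getD []).mapM PySem.Int.ofStr? with
  | none => false
  | some ns0 =>
      let nums := PySem.List.sorted ns0 (fun x => x) false
      let distinct : Int := 1 + ((nums.zip nums.tail).countP (fun p => decide (p.1 < p.2)) : Int)
      distinct == 7 && decide (1 ≤ (PySem.List.pyGet? nums 0).getD 0)
        && decide ((PySem.List.pyGet? nums (-1)).getD 0 ≤ 39)

-- ===== PRECONDITION & SPEC =====
def Spec_filter_lot_num (lot_num : String) (out : Bool) : Prop := out = filter_lot_num_alt lot_num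
instance (lot_num : String) (out : Bool) : Decidable (Spec_filter_lot_num lot_num out) := by unfold Spec_filter_lot_num; infer_instance

-- ===== CLAIM =====
def Claim_equal_filter_lot_num : Prop := ∀ (lot_num : String), Dom_filter_lot_num lot_num → Spec_filter_lot_num lot_num (filter_lot_num lot_num)

-- ===== LEMMAS AND PROOFS =====

-- A's bounds loop is an 'all' over the list
theorem pvAllInRange_eq_all (ns : List Int) :
    pvAllInRange ns = ns.all (fun n => decide (1 ≤ n ∧ n ≤ 39)) := by
  induction ns with
  | nil => rfl
  | cons n ns ih =>
      by_cases h : 1 ≤ n ∧ n ≤ 39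
      · have hb : (decide (n > 39) || decide (n < 1)) = false := by
          simp only [Bool.or_eq_false_iff, decide_eq_false_iff_not]; omega
        simp [pvAllInRange, hb, ih, h]
      · have hb : (decide (n > 39) || decide (n < 1)) = true := by
          simp only [Bool.or_eq_true, decide_eq_true_eq]; omega
        simp [pvAllInRange, hb, h]

-- in a ≤-sorted list every element is ≤ the last one
theorem le_getLast_of_pairwise : ∀ (s : List Int), s.Pairwise (· ≤ ·) →
    ∀ x ∈ s, ∀ L, s.getLast? = some L → x ≤ L := by
  intro s
  induction s with
  | nil => intro _ x hx; simp at hx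
  | cons a t ih =>
      intro hp x hx L hL
      rcases List.pairwise_cons.mp hp with ⟨ha, ht⟩
      cases t with
      | nil =>
          simp at hL hx; omega
      | cons b u =>
          have hL' : (b :: u).getLast? = some L := by
            simpa [List.getLast?_cons_cons] using hL
          rcases List.mem_cons.mp hx with rfl | hx'
          · have hb : x ≤ b := ha b (by simp)
            have := ih ht b (by simp) L hL'
            omega
          · exact ih ht x hx' L hL'

-- distinct count of a ≤-sorted nonempty list = 1 + number of adjacent strict increases
theorem card_toFinset_sorted : ∀ (s : List Int), s.Pairwise (· ≤ ·) → s ≠ [] →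
    s.toFinset.card = 1 + (s.zip s.tail).countP (fun p => decide (p.1 < p.2)) := by
  intro s
  induction s with
  | nil => intro _ h; exact absurd rfl h
  | cons a t ih =>
      intro hp _
      rcases List.pairwise_cons.mp hp with ⟨ha, ht⟩
      cases t with
      | nil => simp
      | cons b u =>
          have hab : a ≤ b := ha b (by simp)
          have iht := ih ht (by simp)
          have hcnt' : List.countP (fun p => decide (p.1 < p.2)) ((a :: b :: u).zip (a :: b :: u).tail)
              = List.countP (fun p => decide (p.1 < p.2)) ((b :: u).zip (b :: u).tail)
                + (if a < b then 1 else 0) := by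
            simp [List.countP_cons]
          by_cases h : a < b
          · have hnotmem : a ∉ (b :: u) := by
              intro hmem
              rcases List.mem_cons.mp hmem with rfl | hmem'
              · omega
              · have hbu := (List.pairwise_cons.mp ht).1 a hmem'
                omega
            rw [List.toFinset_cons, Finset.card_insert_of_notMem (by simpa using hnotmem),
              iht, hcnt', if_pos h]
            omega
          · have hmem : a ∈ (b :: u) := by
              have : a = b := by omega
              simp [this]
            rw [List.toFinset_cons, Finset.card_insert_of_mem (by simpa using hmem),
              iht, hcnt', if_neg h]
            omega

theorem main_eq (lot_num : String) : filter_lot_num lot_num = filter_lot_num_alt lot_num := by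
  unfold filter_lot_num filter_lot_num_alt
  cases h : List.mapM PySem.Int.ofStr? ((PySem.Str.split? lot_num ",").getD []) with
  | none => simp only [h]
  | some ns =>
      simp only [h]
      cases hns : ns with
      | nil => simp [PySem.Set.len, PySem.Set.ofList]
      | cons n0 rest =>
        rw [← hns]
        have hne : ns ≠ [] := by simp [hns]
        set s := PySem.List.sorted ns (fun x => x) false with hs
        have hperm : s.Perm ns := PySem.List.sorted_perm ns (fun x => x) false
        have hsne : s ≠ [] := by
          intro h0
          exact hne (List.Perm.eq_nil (h0 ▸ hperm.symm))
        have hpair : s.Pairwise (· ≤ ·) := by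
          simpa using PySem.List.sorted_pairwise ns (fun x => x)
        -- distinct counts agree
        have hlen : (PySem.Set.ofList ns).length = s.toFinset.card := by
          have hnd : (PySem.Set.ofList ns).Nodup := PySem.Set.nodup_ofList ns
          have hfs : (PySem.Set.ofList ns).toFinset = s.toFinset := by
            apply Finset.ext
            intro x
            simp only [List.mem_toFinset, PySem.Set.mem_ofList]
            exact hperm.mem_iff.symm
          rw [← List.toFinset_card_of_nodup hnd, hfs]
        have hcard := card_toFinset_sorted s hpair hsne
        have hcnt : (PySem.Set.len (PySem.Set.ofList ns) : Int)
            = 1 + ((s.zip s.tail).countP (fun p => decide (p.1 < p.2)) : Int) := by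
          simp only [PySem.Set.len, hlen, hcard]
          push_cast
          ring
        obtain ⟨a, t, hst⟩ := List.exists_cons_of_ne_nil hsne
        -- bounds: A's loop over ns = head/last tests on s
        have hget0 : (PySem.List.pyGet? s 0).getD 0 = a := by
          rw [hst]; simp [PySem.List.pyGet?, PySem.List.pyIdx?]
        have hLsome : s.getLast?.isSome := by rw [hst]; simp
        obtain ⟨L, hL⟩ := Option.isSome_iff_exists.mp hLsome
        have hgetL : (PySem.List.pyGet? s (-1)).getD 0 = L := by
          rw [PySem.List.pyGet?_neg_one, hL]; rfl
        have hbounds : ns.all (fun n => decide (1 ≤ n ∧ n ≤ 39))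
            = (decide (1 ≤ a) && decide (L ≤ 39)) := by
          have hall : ns.all (fun n => decide (1 ≤ n ∧ n ≤ 39)) = s.all (fun n => decide (1 ≤ n ∧ n ≤ 39)) := by
            rcases hb : s.all (fun n => decide (1 ≤ n ∧ n ≤ 39)) with _ | _
            · rw [Bool.eq_false_iff]
              intro hc
              rw [List.all_eq_true] at hc
              rw [← Bool.not_eq_true, List.all_eq_true] at hb
              push Not at hb
              obtain ⟨x, hx, hxn⟩ := hb
              exact hxn (hc x (hperm.mem_iff.mp hx))
            · rw [List.all_eq_true] at hb ⊢
              intro x hx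
              exact hb x (hperm.mem_iff.mpr hx)
          rw [hall]
          rcases hb : (decide (1 ≤ a) && decide (L ≤ 39)) with _ | _
          · rw [Bool.eq_false_iff]
            intro hc
            rw [List.all_eq_true] at hc
            simp only [Bool.and_eq_false_iff, decide_eq_false_iff_not] at hb
            have haMem : a ∈ s := by rw [hst]; simp
            have hLMem : L ∈ s := List.mem_of_getLast? hL
            have h1 := hc a haMem
            have h2 := hc L hLMem
            simp at h1 h2
            rcases hb with hb | hb
            · exact hb (by omega)
            · exact hb (by omega)
          · simp only [Bool.and_eq_true, decide_eq_true_eq] at hb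
            rw [List.all_eq_true]
            intro x hx
            have hax : a ≤ x := by
              have := PySem.List.key_head_sorted_le (xs := ns) (key := fun x => x) (by rw [← hs, hst]) x (hperm.mem_iff.mp hx)
              simpa using this
            have hxL : x ≤ L := le_getLast_of_pairwise s hpair x hx L hL
            simp
            omega
        by_cases h7 : (PySem.Set.len (PySem.Set.ofList ns) : Int) = 7
        · have hd : (1 + ((s.zip s.tail).countP (fun p => decide (p.1 < p.2)) : Int)) = 7 := by omega
          simp only [if_neg (by omega : ¬ PySem.Set.len (PySem.Set.ofList ns) ≠ 7)]
          rw [pvAllInRange_eq_all, hbounds, hget0, hgetL]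
          simp [hd]
        · have hd : ¬ (1 + ((s.zip s.tail).countP (fun p => decide (p.1 < p.2)) : Int)) = 7 := by omega
          simp only [if_pos h7]
          simp [hd]

-- ===== VERDICT =====
theorem filter_lot_num_spec : Claim_equal_filter_lot_num := by
  intro lot_num _
  unfold Spec_filter_lot_num
  exact main_eq lot_num
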